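-- pv_equiv track=rewrite | github.com/Cissou34730/Azure-Architect-Assistant | backend/archive/legacy_ingestion/web_generic.py | is_valid_url
-- ===== SOURCE A (Python) =====
-- def is_valid_url(url: str) -> bool:
--     """Check if URL should be crawled (exclude images, videos, etc.)."""
--     # Skip common media file extensions
--     skip_extensions = [
--         '.jpg', '.jpeg', '.png', '.gif', '.bmp', '.svg', '.webp', '.ico',  # Images
--         '.mp4', '.avi', '.mov', '.wmv', '.flv', '.webm',  # Videos
--         '.mp3', '.wav', '.ogg', '.flac',  # Audio
--         '.zip', '.tar', '.gz', '.rar',  # Archives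
--         '.exe', '.dmg', '.pkg', '.deb'  # Executables
--     ]
--     url_lower = url.lower()
--     return not any(url_lower.endswith(ext) for ext in skip_extensions)
-- ===== SOURCE B (Python) =====
-- MEDIA_EXTS = {
--     'jpg', 'jpeg', 'png', 'gif', 'bmp', 'svg', 'webp', 'ico',
--     'mp4', 'avi', 'mov', 'wmv', 'flv', 'webm',
--     'mp3', 'wav', 'ogg', 'flac',
--     'zip', 'tar', 'gz', 'rar',
--     'exe', 'dmg', 'pkg', 'deb',
-- }
--
-- def is_valid_url(url: str) -> bool:
--     """Check if URL should be crawled (exclude images, videos, etc.)."""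
--     parts = url.lower().rsplit('.', 1)
--     return len(parts) == 1 or parts[1] not in MEDIA_EXTS
-- ===== Notes on version B (the rewrite author's own statement) =====
-- stated objective: idiomatic
-- what changed: Replaces the 24-iteration any(endswith) scan over dotted suffixes with extracting the single trailing extension via rsplit('.', 1) and one membership test in a set of bare extension names.
import Mathlib
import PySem

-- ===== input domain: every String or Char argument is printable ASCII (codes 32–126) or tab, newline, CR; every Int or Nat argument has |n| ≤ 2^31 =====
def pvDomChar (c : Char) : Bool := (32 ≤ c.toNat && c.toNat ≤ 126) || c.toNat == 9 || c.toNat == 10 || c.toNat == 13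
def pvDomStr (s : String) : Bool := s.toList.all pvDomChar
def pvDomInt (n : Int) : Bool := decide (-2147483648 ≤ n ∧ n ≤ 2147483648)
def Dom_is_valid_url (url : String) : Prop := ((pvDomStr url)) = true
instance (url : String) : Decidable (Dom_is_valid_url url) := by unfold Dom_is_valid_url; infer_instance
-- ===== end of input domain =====

-- B replaces A's 24-way endswith scan by extracting the single trailing extension
-- (rsplit('.', 1)) and one set-membership test (objective: idiomatic).

-- ===== PORT A =====
def skipExtensions : List String :=
  [".jpg", ".jpeg", ".png", ".gif", ".bmp", ".svg", ".webp", ".ico",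
   ".mp4", ".avi", ".mov", ".wmv", ".flv", ".webm",
   ".mp3", ".wav", ".ogg", ".flac",
   ".zip", ".tar", ".gz", ".rar",
   ".exe", ".dmg", ".pkg", ".deb"]

def is_valid_url (url : String) : Bool :=
  let url_lower := PySem.Str.lower url
  !(skipExtensions.any (fun ext => PySem.Str.endswith url_lower ext))

-- ===== PORT B =====
-- B's media-extension set (distinct literals), strings represented as char lists
def mediaExts : List (List Char) :=
  ["jpg".toList, "jpeg".toList, "png".toList, "gif".toList, "bmp".toList,
   "svg".toList, "webp".toList, "ico".toList,
   "mp4".toList, "avi".toList, "mov".toList, "wmv".toList, "flv".toList, "webm".toList,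
   "mp3".toList, "wav".toList, "ogg".toList, "flac".toList,
   "zip".toList, "tar".toList, "gz".toList, "rar".toList,
   "exe".toList, "dmg".toList, "pkg".toList, "deb".toList]

-- rsplit('.', 1) ported by hand (no PySem primitive): if there is no '.', the split
-- has one part; otherwise the part after the LAST '.' is the reversed run of
-- non-'.' chars at the end. Exact for maxsplit = 1.
def is_valid_url_alt (url : String) : Bool :=
  let l := (PySem.Str.lower url).toList
  if l.contains '.' then
    !(mediaExts.contains ((l.reverse.takeWhile (· ≠ '.')).reverse))
  else
    true

-- ===== PRECONDITION & SPEC =====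
def Spec_is_valid_url (url : String) (out : Bool) : Prop := out = is_valid_url_alt url
instance (url : String) (out : Bool) : Decidable (Spec_is_valid_url url out) := by unfold Spec_is_valid_url; infer_instance

-- ===== CLAIM (what is proved, stated in full; the proofs are below) =====
def Claim_equal_is_valid_url : Prop := ∀ (url : String), Dom_is_valid_url url → Spec_is_valid_url url (is_valid_url url)

-- ===== LEMMAS AND PROOFS =====

-- a suffix '.'++e (e nonempty, dot-free) is exactly: some '.' occurs and the
-- run after the last '.' equals e
-- takeWhile over a dot-free run stops exactly at the first '.'
theorem takeWhile_run (f rest : List Char) (hd : '.' ∉ f) :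
    (f ++ '.' :: rest).takeWhile (· ≠ '.') = f := by
  induction f with
  | nil => simp
  | cons a f ih =>
      have ha : a ≠ '.' := fun h => hd (by simp [h])
      have hf : '.' ∉ f := fun h => hd (by simp [h])
      rw [List.cons_append, List.takeWhile_cons_of_pos (by simpa using ha), ih hf]

-- the first element dropWhile keeps falsifies the predicate
theorem dropWhile_head_false {p : Char → Bool} {l : List Char} {c : Char} {t : List Char}
    (h : l.dropWhile p = c :: t) : p c = false := by
  induction l with
  | nil => simp [List.dropWhile] at h
  | cons a l ih =>
      by_cases hpa : p a = true
      · rw [List.dropWhile_cons_of_pos hpa] at h; exact ih h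
      · rw [List.dropWhile_cons_of_neg hpa] at h
        cases h; simpa using hpa

theorem endswith_dot (l e : List Char) (_he : e ≠ []) (hd : '.' ∉ e) :
    PySem.Chars.endswith l ('.' :: e)
      = (l.contains '.' && ((l.reverse.takeWhile (· ≠ '.')).reverse == e)) := by
  rw [Bool.eq_iff_iff, PySem.Chars.endswith_iff]
  simp only [Bool.and_eq_true, beq_iff_eq, List.contains_eq_mem, decide_eq_true_eq]
  constructor
  · rintro ⟨t, ht⟩
    have hrev : l.reverse = e.reverse ++ '.' :: t.reverse := by
      rw [← ht]; simp
    have hdrev : '.' ∉ e.reverse := by simpa using hd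
    constructor
    · have : ('.' : Char) ∈ l.reverse := by rw [hrev]; simp
      simpa using this
    · rw [hrev, takeWhile_run _ _ hdrev]; simp
  · rintro ⟨hm, hw⟩
    have htw : l.reverse.takeWhile (· ≠ '.') = e.reverse := by
      rw [← hw]; simp
    have hmem : ('.' : Char) ∈ l.reverse := by simpa using hm
    have hne : l.reverse.dropWhile (· ≠ '.') ≠ [] := by
      intro h0
      have := (List.dropWhile_eq_nil_iff).mp h0 '.' hmem
      simp at this
    obtain ⟨c, t, hct⟩ := List.exists_cons_of_ne_nil hne
    have hc : c = '.' := by simpa using dropWhile_head_false hct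
    have hsplit : l.reverse = e.reverse ++ '.' :: t := by
      conv_lhs => rw [← List.takeWhile_append_dropWhile (p := fun c => decide (c ≠ '.')) (l := l.reverse)]
      rw [htw, hct, hc]
    refine ⟨t.reverse, ?_⟩
    have h2 := congrArg List.reverse hsplit
    simp at h2
    simp [h2]

theorem any_endswith (l : List Char) (L : List (List Char))
    (h : ∀ e ∈ L, e ≠ [] ∧ '.' ∉ e) :
    L.any (fun e => PySem.Chars.endswith l ('.' :: e))
      = (l.contains '.' && L.contains ((l.reverse.takeWhile (· ≠ '.')).reverse)) := by
  induction L with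
  | nil => simp
  | cons e L ih =>
      have h1 := h e (by simp)
      have h2 : ∀ e' ∈ L, e' ≠ [] ∧ '.' ∉ e' := fun e' he' => h e' (by simp [he'])
      simp only [List.any_cons, ih h2, endswith_dot l e h1.1 h1.2, List.contains_cons]
      cases l.contains '.' <;> simp [Bool.and_or_distrib_left]

-- ===== VERDICT (by name: the statement is the Claim_ definition above) =====
theorem is_valid_url_spec : Claim_equal_is_valid_url := by
  intro url _
  unfold Spec_is_valid_url is_valid_url is_valid_url_alt
  simp only [PySem.Str.endswith_eq]
  have hmap : skipExtensions.map String.toList = mediaExts.map (fun e => '.' :: e) := by decide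
  have hany : skipExtensions.any (fun ext => PySem.Chars.endswith (PySem.Str.lower url).toList ext.toList)
      = mediaExts.any (fun e => PySem.Chars.endswith (PySem.Str.lower url).toList ('.' :: e)) := by
    simpa [List.any_map, Function.comp] using
      congrArg (fun M => M.any (fun e => PySem.Chars.endswith (PySem.Str.lower url).toList e)) hmap
  rw [hany, any_endswith _ mediaExts (by decide)]
  cases h : (PySem.Str.lower url).toList.contains '.' <;> simp
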